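-- pv_equiv track=rewrite | github.com/krishnakanthpathi/projects | contests/shapeperimeter.py | find
-- ===== SOURCE A (Python) =====
-- from typing import List, Tuple, Set
--
-- def find(boxes: Set[Tuple[int, int]]) -> int:
--     """
--     Calculate the perimeter of all boxes using a more efficient approach.
--     Each box contributes 4 to the perimeter unless it shares a side with another box.
--     """
--     total_perimeter = 0
--     directions = [(-1, 0), (1, 0), (0, -1), (0, 1)]
--
--     for x, y in boxes:
--         for dx, dy in directions:
--             if (x + dx, y + dy) not in boxes:
--                 total_perimeter += 1
--
--     return total_perimeter
-- ===== SOURCE B (Python) =====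
-- def find(boxes):
--     """Count shared edges in two directions only; perimeter = 4*n - 2*shared."""
--     n = 0
--     shared = 0
--     for x, y in boxes:
--         n += 1
--         if (x + 1, y) in boxes:
--             shared += 1
--         if (x, y + 1) in boxes:
--             shared += 1
--     return 4 * n - 2 * shared
-- ===== Notes on version B (the rewrite author's own statement) =====
-- stated objective: simpler
-- what changed: Instead of counting exposed sides over all four directions per box, B counts each shared edge once by probing only the right and up neighbours and returns the closed form 4*n - 2*shared.
import Mathlib
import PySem

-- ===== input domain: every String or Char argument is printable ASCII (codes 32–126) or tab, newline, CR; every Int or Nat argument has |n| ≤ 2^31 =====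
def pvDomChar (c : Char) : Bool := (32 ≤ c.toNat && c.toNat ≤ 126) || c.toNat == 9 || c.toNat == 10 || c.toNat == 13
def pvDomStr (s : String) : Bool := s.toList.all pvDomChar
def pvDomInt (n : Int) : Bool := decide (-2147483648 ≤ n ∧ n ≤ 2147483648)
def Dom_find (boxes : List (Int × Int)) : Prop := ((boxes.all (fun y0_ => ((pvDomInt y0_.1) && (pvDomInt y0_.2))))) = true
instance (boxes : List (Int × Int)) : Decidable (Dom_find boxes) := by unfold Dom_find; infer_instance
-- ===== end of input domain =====

-- B replaces the four-direction exposed-side count by counting each shared edge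
-- once (right and up probes only) and returning the closed form 4*n - 2*shared;
-- objective: simpler.

-- ===== PORT A =====
def dirsA : List (Int × Int) := [(-1, 0), (1, 0), (0, -1), (0, 1)]

def find (boxes : List (Int × Int)) : Int :=
  boxes.foldl (fun acc b =>
    dirsA.foldl (fun acc2 d =>
      if (b.1 + d.1, b.2 + d.2) ∈ boxes then acc2 else acc2 + 1) acc) 0

-- ===== PORT B =====
def find_alt (boxes : List (Int × Int)) : Int :=
  let c := boxes.foldl (fun (acc : Int × Int) b =>
      (acc.1 + 1,
       acc.2 + (if (b.1 + 1, b.2) ∈ boxes then 1 else 0)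
             + (if (b.1, b.2 + 1) ∈ boxes then 1 else 0))) (0, 0)
  4 * c.1 - 2 * c.2

-- ===== PRECONDITION & SPEC =====
-- Pre_ excludes lists with duplicate boxes: the parameter is declared a Python
-- set, and on a duplicate-carrying list A's per-copy recount is accidental.
def Pre_find (boxes : List (Int × Int)) : Prop := boxes.Nodup
instance (boxes : List (Int × Int)) : Decidable (Pre_find boxes) := by unfold Pre_find; infer_instance
def pvWitness_find : (List (Int × Int)) := [(0, 0), (1, 0), (1, 1)]

def Spec_find (boxes : List (Int × Int)) (out : Int) : Prop := out = find_alt boxes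
instance (boxes : List (Int × Int)) (out : Int) : Decidable (Spec_find boxes out) := by unfold Spec_find; infer_instance

-- ===== CLAIM (what is proved, stated in full; the proofs are below) =====
def Claim_equal_find : Prop := ∀ (boxes : List (Int × Int)), Dom_find boxes → Pre_find boxes → Spec_find boxes (find boxes)

-- ===== LEMMAS AND PROOFS =====

/-- number of elements of `l` whose `(u,v)`-neighbour is in `l` (as an Int sum) -/
def cnt (u v : Int) (l : List (Int × Int)) : Int :=
  (l.map (fun b => if (b.1 + u, b.2 + v) ∈ l then (1 : Int) else 0)).sum

theorem sum_map_lin {α : Type} (f1 f2 f3 f4 : α → Int) (l : List α) :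
    (l.map (fun b => (4 : Int) - f1 b - f2 b - f3 b - f4 b)).sum
    = 4 * l.length - (l.map f1).sum - (l.map f2).sum - (l.map f3).sum - (l.map f4).sum := by
  induction l with
  | nil => simp
  | cons x xs ih => simp [ih]; ring

theorem inner_eq (l : List (Int × Int)) (b : Int × Int) (acc : Int) :
    dirsA.foldl (fun acc2 d =>
      if (b.1 + d.1, b.2 + d.2) ∈ l then acc2 else acc2 + 1) acc
    = acc + ((4 : Int)
        - (if (b.1 + (-1), b.2 + 0) ∈ l then (1:Int) else 0)
        - (if (b.1 + 1, b.2 + 0) ∈ l then (1:Int) else 0)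
        - (if (b.1 + 0, b.2 + (-1)) ∈ l then (1:Int) else 0)
        - (if (b.1 + 0, b.2 + 1) ∈ l then (1:Int) else 0)) := by
  simp only [dirsA, List.foldl]
  split_ifs <;> ring

theorem find_aux (l l' : List (Int × Int)) (acc : Int) :
    l'.foldl (fun acc b =>
      dirsA.foldl (fun acc2 d =>
        if (b.1 + d.1, b.2 + d.2) ∈ l then acc2 else acc2 + 1) acc) acc
    = acc + (l'.map (fun b => (4 : Int)
        - (if (b.1 + (-1), b.2 + 0) ∈ l then (1:Int) else 0)
        - (if (b.1 + 1, b.2 + 0) ∈ l then (1:Int) else 0)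
        - (if (b.1 + 0, b.2 + (-1)) ∈ l then (1:Int) else 0)
        - (if (b.1 + 0, b.2 + 1) ∈ l then (1:Int) else 0))).sum := by
  induction l' generalizing acc with
  | nil => simp
  | cons x xs ih =>
    rw [List.foldl_cons, ih, inner_eq]
    simp only [List.map, List.sum_cons]
    ring

theorem find_eq (l : List (Int × Int)) :
    find l = 4 * l.length - cnt (-1) 0 l - cnt 1 0 l - cnt 0 (-1) l - cnt 0 1 l := by
  unfold find
  rw [find_aux l l 0, sum_map_lin]
  unfold cnt
  ring

theorem fold_alt_aux (l l' : List (Int × Int)) (acc : Int × Int) :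
    l'.foldl (fun (acc : Int × Int) b =>
      (acc.1 + 1,
       acc.2 + (if (b.1 + 1, b.2) ∈ l then 1 else 0)
             + (if (b.1, b.2 + 1) ∈ l then 1 else 0))) acc
    = (acc.1 + l'.length,
       acc.2 + (l'.map (fun b =>
         (if (b.1 + 1, b.2) ∈ l then (1:Int) else 0)
         + (if (b.1, b.2 + 1) ∈ l then (1:Int) else 0))).sum) := by
  induction l' generalizing acc with
  | nil => simp
  | cons x xs ih =>
    simp only [List.foldl, List.map, List.sum_cons, List.length_cons, ih]
    rw [Prod.mk.injEq]
    refine ⟨by push_cast; ring, by ring⟩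

theorem find_alt_eq (l : List (Int × Int)) :
    find_alt l = 4 * l.length - 2 * (cnt 1 0 l + cnt 0 1 l) := by
  unfold find_alt
  rw [fold_alt_aux l l (0, 0)]
  unfold cnt
  rw [PySem.List.sum_map_add_int]
  simp only [zero_add]
  ring_nf

theorem card_shift (F : Finset (Int × Int)) (u v : Int) :
    (F.filter (fun b => (b.1 + u, b.2 + v) ∈ F)).card
    = (F.filter (fun b => (b.1 + (-u), b.2 + (-v)) ∈ F)).card := by
  apply Finset.card_bij' (fun b _ => (b.1 + u, b.2 + v)) (fun c _ => (c.1 + (-u), c.2 + (-v)))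
  · intro a ha
    simp only [Finset.mem_filter] at ha ⊢
    refine ⟨ha.2, ?_⟩
    convert ha.1 using 2 <;> ring
  · intro a ha
    simp only [Finset.mem_filter] at ha ⊢
    refine ⟨ha.2, ?_⟩
    convert ha.1 using 2 <;> ring
  · intro a _
    ext <;> simp
  · intro a _
    ext <;> simp

theorem cnt_card (u v : Int) (l : List (Int × Int)) (h : l.Nodup) :
    cnt u v l = ((l.toFinset.filter (fun b => (b.1 + u, b.2 + v) ∈ l.toFinset)).card : Int) := by
  unfold cnt
  have hp : (l.map (fun b => if (b.1 + u, b.2 + v) ∈ l then (1 : Int) else 0)).sum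
      = ((l.countP (fun b => decide ((b.1 + u, b.2 + v) ∈ l))) : Int) := by
    rw [← PySem.List.sum_map_ite_one_zero (fun b => decide ((b.1 + u, b.2 + v) ∈ l)) l]
    simp
  rw [hp, List.countP_eq_length_filter,
      ← List.toFinset_card_of_nodup (h.filter _), List.toFinset_filter]
  congr 2
  apply Finset.filter_congr
  intro b _
  simp

theorem cnt_opp (u v : Int) (l : List (Int × Int)) (h : l.Nodup) :
    cnt u v l = cnt (-u) (-v) l := by
  rw [cnt_card u v l h, cnt_card (-u) (-v) l h, card_shift]

-- ===== VERDICT (by name: the statement is the Claim_ definition above) =====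
theorem find_spec : Claim_equal_find := by
  intro boxes _ hpre
  unfold Spec_find
  rw [find_eq, find_alt_eq]
  have h1 := cnt_opp 1 0 boxes hpre
  have h2 := cnt_opp 0 1 boxes hpre
  simp only [neg_zero] at h1 h2
  rw [h1, h2]; ring
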